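-- pv_equiv track=rewrite | github.com/ngoduythinh250601/Codelearn | All/differentSquares/differentSquares.py | differentSquares
-- ===== SOURCE A (Python) =====
-- def differentSquares(matrix):
--     dif = []
--     for i in range(len(matrix) - 1):
--         for j in range(len(matrix[0]) - 1):
--             item = [
--                 matrix[i][j],
--                 matrix[i][j + 1],
--                 matrix[i + 1][j],
--                 matrix[i + 1][j + 1],
--             ]
--             if item not in dif:
--                 dif.append(item)
--     return len(dif)
-- ===== SOURCE B (Python) =====
-- def differentSquares(matrix):
--     blocks = [
--         [matrix[i][j], matrix[i][j + 1], matrix[i + 1][j], matrix[i + 1][j + 1]]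
--         for i in range(len(matrix) - 1)
--         for j in range(len(matrix[0]) - 1)
--     ]
--     blocks.sort()
--     count = 0
--     prev = None
--     for b in blocks:
--         if b != prev:
--             count += 1
--             prev = b
--     return count
-- ===== Notes on version B (the rewrite author's own statement) =====
-- stated objective: faster
-- what changed: A dedups while scanning by an O(k) list-membership test on every 2x2 block; B first collects all blocks, sorts them once, then counts group boundaries in a single linear pass over the sorted list.
import Mathlib
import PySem

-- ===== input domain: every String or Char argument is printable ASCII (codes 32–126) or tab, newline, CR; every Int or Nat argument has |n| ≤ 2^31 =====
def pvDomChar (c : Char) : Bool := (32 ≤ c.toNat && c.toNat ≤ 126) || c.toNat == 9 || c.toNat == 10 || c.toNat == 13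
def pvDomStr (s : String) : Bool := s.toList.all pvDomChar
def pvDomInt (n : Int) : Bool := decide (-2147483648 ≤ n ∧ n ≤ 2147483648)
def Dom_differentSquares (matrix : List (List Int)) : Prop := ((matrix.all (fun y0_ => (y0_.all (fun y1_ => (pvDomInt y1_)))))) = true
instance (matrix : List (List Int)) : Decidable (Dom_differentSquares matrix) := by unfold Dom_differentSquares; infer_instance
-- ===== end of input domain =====

-- B collects all 2x2 blocks, sorts them once, and counts group boundaries in one linear pass,
-- instead of A's membership-scan dedup; equivalence of return values is proved on Pre_ (A raises on ragged matrices).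


-- ===== PORT A =====
-- The 2x2 block at (i, j): the list [matrix[i][j], matrix[i][j+1], matrix[i+1][j], matrix[i+1][j+1]].
-- pyGetD totalises the indexing; under Pre_ every index A reaches is in range, so the default is never used.
def pvItem (matrix : List (List Int)) (i j : Int) : List Int :=
  [PySem.List.pyGetD (PySem.List.pyGetD matrix i []) j 0,
   PySem.List.pyGetD (PySem.List.pyGetD matrix i []) (j + 1) 0,
   PySem.List.pyGetD (PySem.List.pyGetD matrix (i + 1) []) j 0,
   PySem.List.pyGetD (PySem.List.pyGetD matrix (i + 1) []) (j + 1) 0]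

-- Literal port of A: build dif by appending each block not already present, return len(dif).
-- (len(matrix[0]) is read as (matrix.headD []).length; when matrix = [] the outer loop is empty and Python
-- never evaluates matrix[0], so the headD default is unobservable.)
def differentSquares (matrix : List (List Int)) : Int :=
  let dif : List (List Int) :=
    (PySem.List.pyRange 0 ((matrix.length : Int) - 1) 1).foldl (fun dif i =>
      (PySem.List.pyRange 0 (((matrix.headD []).length : Int) - 1) 1).foldl (fun dif j =>
        let item := pvItem matrix i j
        if item ∈ dif then dif else dif ++ [item]) dif) []
  (dif.length : Int)

-- ===== PORT B =====
-- Literal port of Source B: the comprehension collecting every block, sort, then one pass counting boundaries.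
def pvBlocks (matrix : List (List Int)) : List (List Int) :=
  (PySem.List.pyRange 0 ((matrix.length : Int) - 1) 1).flatMap (fun i =>
    (PySem.List.pyRange 0 (((matrix.headD []).length : Int) - 1) 1).map (fun j => pvItem matrix i j))

-- (the LT/DecidableLT instance arguments are spelled out only to name Mathlib's linear order on
-- List Int — definitionally the same lexicographic order Python uses to sort lists of ints)
def differentSquares_alt (matrix : List (List Int)) : Int :=
  let sortedBlocks := @PySem.List.sorted (List Int) (List Int) List.instLinearOrder.toLT
    LinearOrder.toDecidableLT (pvBlocks matrix) (fun x => x) false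
  let res := sortedBlocks.foldl
    (fun (st : Int × Option (List Int)) b => if st.2 = some b then st else (st.1 + 1, some b))
    (0, none)
  res.1

-- ===== PRECONDITION & SPEC =====
-- Pre_ excludes exactly the ragged matrices on which Python A raises an IndexError: when there are at
-- least two rows and the first row has at least two entries, every row must be at least as long as the first.
def Pre_differentSquares (matrix : List (List Int)) : Prop :=
  matrix.length ≤ 1 ∨ (matrix.headD []).length ≤ 1 ∨
    ∀ row ∈ matrix, (matrix.headD []).length ≤ row.length
instance (matrix : List (List Int)) : Decidable (Pre_differentSquares matrix) := by
  unfold Pre_differentSquares; infer_instance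

def pvWitness_differentSquares : List (List Int) := [[1, 2], [3, 4]]

def Spec_differentSquares (matrix : List (List Int)) (out : Int) : Prop := out = differentSquares_alt matrix
instance (matrix : List (List Int)) (out : Int) : Decidable (Spec_differentSquares matrix out) := by
  unfold Spec_differentSquares; infer_instance

-- ===== CLAIM (what is proved, stated in full; the proofs are below) =====
def Claim_equal_differentSquares : Prop := ∀ (matrix : List (List Int)), Dom_differentSquares matrix → Pre_differentSquares matrix → Spec_differentSquares matrix (differentSquares matrix)

-- ===== LEMMAS AND PROOFS =====

-- A's conditional-append fold keeps the accumulator nodup and its elements are acc ∪ blocks.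
theorem pvAfold_nodup_toFinset (l : List (List Int)) :
    ∀ d : List (List Int), d.Nodup →
      (l.foldl (fun d x => if x ∈ d then d else d ++ [x]) d).Nodup ∧
      (l.foldl (fun d x => if x ∈ d then d else d ++ [x]) d).toFinset = d.toFinset ∪ l.toFinset := by
  induction l with
  | nil => intro d hd; simpa using hd
  | cons x xs ih =>
    intro d hd
    simp only [List.foldl_cons]
    by_cases hx : x ∈ d
    · rcases ih d hd with ⟨h1, h2⟩
      rw [if_pos hx]
      refine ⟨h1, ?_⟩
      rw [h2, List.toFinset_cons]
      ext y
      simp only [Finset.mem_union, List.mem_toFinset, Finset.mem_insert]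
      constructor
      · rintro (h | h)
        exacts [Or.inl h, Or.inr (Or.inr h)]
      · rintro (h | rfl | h)
        exacts [Or.inl h, Or.inl hx, Or.inr h]
    · have hnd : (d ++ [x]).Nodup := by
        refine List.Nodup.append hd (List.nodup_singleton x) ?_
        intro a ha hax
        rw [List.mem_singleton] at hax
        exact hx (hax ▸ ha)
      rcases ih (d ++ [x]) hnd with ⟨h1, h2⟩
      rw [if_neg hx]
      refine ⟨h1, ?_⟩
      rw [h2, List.toFinset_cons, List.toFinset_append]
      ext y
      simp only [Finset.mem_union, List.mem_toFinset, Finset.mem_insert, List.mem_singleton]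
      tauto

-- The count accumulator of B's scan: fst of the fold is the start count plus a recursive group count.
def pvG (prev : Option (List Int)) : List (List Int) → Nat
  | [] => 0
  | x :: xs => if prev = some x then pvG prev xs else 1 + pvG (some x) xs

theorem pvBfold_fst (l : List (List Int)) :
    ∀ (c : Int) (prev : Option (List Int)),
      (l.foldl (fun (st : Int × Option (List Int)) b => if st.2 = some b then st else (st.1 + 1, some b))
        (c, prev)).1 = c + (pvG prev l : Int) := by
  induction l with
  | nil => intro c prev; simp [pvG]
  | cons x xs ih =>
    intro c prev
    simp only [List.foldl_cons, pvG]
    by_cases h : prev = some x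
    · simp [h, ih]
    · simp only [if_neg h]
      rw [ih]
      push_cast
      ring

-- On a sorted list whose elements all dominate p, the scan starting at prev = some p counts the
-- distinct elements other than p.
theorem pvG_some (l : List (List Int)) :
    l.Pairwise (· ≤ ·) → ∀ p : List Int, (∀ x ∈ l, p ≤ x) →
      pvG (some p) l = (l.toFinset.erase p).card := by
  induction l with
  | nil => intro _ p _; simp [pvG]
  | cons x xs ih =>
    intro hpw p hlb
    have hx_le : ∀ y ∈ xs, x ≤ y := fun y hy => List.rel_of_pairwise_cons hpw hy
    have hxs_pw : xs.Pairwise (· ≤ ·) := List.Pairwise.of_cons hpw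
    by_cases hpx : p = x
    · subst hpx
      have : pvG (some p) (p :: xs) = pvG (some p) xs := by simp [pvG]
      rw [this, ih hxs_pw p hx_le, List.toFinset_cons, Finset.erase_insert_eq_erase]
    · have hpnotin : p ∉ insert x xs.toFinset := by
        intro hmem
        rcases Finset.mem_insert.mp hmem with h | h
        · exact hpx h
        · exact hpx (le_antisymm (hlb x List.mem_cons_self) (hx_le p (List.mem_toFinset.mp h)))
      have hstep : pvG (some p) (x :: xs) = 1 + pvG (some x) xs := by
        simp [pvG, fun h : p = x => hpx h]
      rw [hstep, ih hxs_pw x hx_le, List.toFinset_cons, Finset.erase_eq_of_notMem hpnotin]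
      by_cases hxm : x ∈ xs
      · have hxf : x ∈ xs.toFinset := List.mem_toFinset.mpr hxm
        rw [Finset.insert_eq_self.mpr hxf, Finset.card_erase_of_mem hxf]
        have : 1 ≤ xs.toFinset.card := Finset.card_pos.mpr ⟨x, hxf⟩
        omega
      · have hxf : x ∉ xs.toFinset := fun h => hxm (List.mem_toFinset.mp h)
        rw [Finset.card_insert_of_notMem hxf, Finset.erase_eq_of_notMem hxf]
        omega

theorem pvG_none (l : List (List Int)) (hpw : l.Pairwise (· ≤ ·)) :
    pvG none l = l.toFinset.card := by
  cases l with
  | nil => simp [pvG]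
  | cons x xs =>
    have hx_le : ∀ y ∈ xs, x ≤ y := fun y hy => List.rel_of_pairwise_cons hpw hy
    have hstep : pvG none (x :: xs) = 1 + pvG (some x) xs := by simp [pvG]
    rw [hstep, pvG_some xs (List.Pairwise.of_cons hpw) x hx_le, List.toFinset_cons]
    by_cases hxm : x ∈ xs
    · have hxf : x ∈ xs.toFinset := List.mem_toFinset.mpr hxm
      rw [Finset.insert_eq_self.mpr hxf, Finset.card_erase_of_mem hxf]
      have : 1 ≤ xs.toFinset.card := Finset.card_pos.mpr ⟨x, hxf⟩
      omega
    · have hxf : x ∉ xs.toFinset := fun h => hxm (List.mem_toFinset.mp h)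
      rw [Finset.card_insert_of_notMem hxf, Finset.erase_eq_of_notMem hxf]
      omega

-- A's nested fold is the conditional-append fold over the flat block list.
theorem pvA_eq_card (matrix : List (List Int)) :
    differentSquares matrix = ((pvBlocks matrix).toFinset.card : Int) := by
  have he :
      (PySem.List.pyRange 0 ((matrix.length : Int) - 1) 1).foldl (fun dif i =>
        (PySem.List.pyRange 0 (((matrix.headD []).length : Int) - 1) 1).foldl (fun dif j =>
          let item := pvItem matrix i j
          if item ∈ dif then dif else dif ++ [item]) dif) [] =
      (pvBlocks matrix).foldl (fun d x => if x ∈ d then d else d ++ [x]) [] := by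
    rw [pvBlocks, List.foldl_flatMap]
    simp [List.foldl_map]
  unfold differentSquares
  rw [he]
  show ((List.foldl (fun d x => if x ∈ d then d else d ++ [x]) [] (pvBlocks matrix)).length : Int) =
    ((pvBlocks matrix).toFinset.card : Int)
  rcases pvAfold_nodup_toFinset (pvBlocks matrix) [] List.nodup_nil with ⟨h1, h2⟩
  rw [← List.toFinset_card_of_nodup h1, h2]
  simp

theorem pvB_eq_card (matrix : List (List Int)) :
    differentSquares_alt matrix = ((pvBlocks matrix).toFinset.card : Int) := by
  unfold differentSquares_alt
  rw [pvBfold_fst]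
  rw [pvG_none _ (PySem.List.sorted_pairwise (pvBlocks matrix) (fun x => x))]
  rw [List.toFinset_eq_of_perm _ _ (@PySem.List.sorted_perm (List Int) (List Int)
    List.instLinearOrder.toLT LinearOrder.toDecidableLT (pvBlocks matrix) (fun x => x) false)]
  simp

-- ===== VERDICT (by name: the statement is the Claim_ definition above) =====
theorem differentSquares_spec : Claim_equal_differentSquares := by
  intro matrix _ _
  unfold Spec_differentSquares
  rw [pvA_eq_card, pvB_eq_card]
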